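-- pv_equiv track=rewrite | github.com/enriquetaso/cassidoos | 2023/289-repeatedGroups.py | repeatedGroups
-- ===== SOURCE A (Python) =====
-- def repeatedGroups(lst):
--     """Given a list of numbers, return all groups
--     of repeating consecutive numbers.
--
--
--     The function works by iterating over the input
--     list, keeping track of the current group of
--     consecutive numbers. If the current number is
--     the same as the previous number, it is added to
--     the current group. If the current number is
--     different from the previous number, the current
--     group is finished and added to the list of groups,
--     and a new current group is started with the current
--     number.
--
--     Finally, if there is a current group when the
--     iteration is finished, it is also added to the list
--     of groups.
--
--     Time complexity: O(n)
--     Space complexity: O(n)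
--     """
--     groups = []
--     current_group = []
--
--     for i in range(len(lst)):
--         if i == 0 or lst[i] != lst[i - 1]:
--             if len(current_group) > 1:
--                 groups.append(current_group)
--             current_group = [lst[i]]
--         else:
--             current_group.append(lst[i])
--
--     if len(current_group) > 1:
--         groups.append(current_group)
--
--     return groups
-- ===== SOURCE B (Python) =====
-- def repeatedGroups(lst):
--     n = len(lst)
--     bounds = [i for i in range(n) if i == 0 or lst[i] != lst[i - 1]] + [n]
--     return [lst[a:b] for a, b in zip(bounds, bounds[1:]) if b - a > 1]
-- ===== Notes on version B (the rewrite author's own statement) =====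
-- stated objective: alternative
-- what changed: B replaces A's single-pass loop with a mutable current-group accumulator and post-loop flush by staged passes: it first computes the list of run-boundary indices, then slices the list between consecutive boundaries and keeps the slices of length > 1.
import Mathlib
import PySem

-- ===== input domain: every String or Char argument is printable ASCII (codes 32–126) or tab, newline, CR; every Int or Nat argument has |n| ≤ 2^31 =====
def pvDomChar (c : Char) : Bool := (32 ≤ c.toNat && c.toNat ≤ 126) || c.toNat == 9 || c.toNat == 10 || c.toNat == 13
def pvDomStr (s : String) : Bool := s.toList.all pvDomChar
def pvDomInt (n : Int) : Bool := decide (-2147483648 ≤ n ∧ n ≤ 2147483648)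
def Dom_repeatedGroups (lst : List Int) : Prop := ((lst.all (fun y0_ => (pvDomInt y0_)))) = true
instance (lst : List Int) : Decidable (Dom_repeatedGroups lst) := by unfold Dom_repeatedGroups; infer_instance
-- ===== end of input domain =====

-- B replaces A's single-pass mutable current-group accumulator and post-loop flush by staged
-- passes: compute the run-boundary indices first, then slice between consecutive boundaries
-- and keep the slices of length > 1 (alternative decomposition, same O(n) cost).

-- ===== PORT A =====
-- loop body of A: state = (groups, current_group), i the loop index
def repeatedGroupsStep (lst : List Int) (st : List (List Int) × List Int) (i : Int) :
    List (List Int) × List Int :=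
  let groups := st.1
  let current_group := st.2
  if i = 0 ∨ PySem.List.pyGetD lst i 0 ≠ PySem.List.pyGetD lst (i - 1) 0 then
    (if current_group.length > 1 then groups ++ [current_group] else groups, [PySem.List.pyGetD lst i 0])
  else
    (groups, current_group ++ [PySem.List.pyGetD lst i 0])

def repeatedGroups (lst : List Int) : List (List Int) :=
  let st := (PySem.List.pyRange 0 lst.length 1).foldl (repeatedGroupsStep lst) ([], [])
  if st.2.length > 1 then st.1 ++ [st.2] else st.1

-- ===== PORT B =====
def repeatedGroups_alt (lst : List Int) : List (List Int) :=
  let n : Int := PySem.List.len lst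
  let bounds :=
    ((PySem.List.pyRange 0 n 1).filter
      (fun i => decide (i = 0) || !(PySem.List.pyGetD lst i 0 == PySem.List.pyGetD lst (i - 1) 0)))
    ++ [n]
  ((bounds.zip (PySem.List.slice bounds (some 1) none)).filter
      (fun ab => decide (ab.2 - ab.1 > 1))).map
    (fun ab => PySem.List.slice lst (some ab.1) (some ab.2))

-- ===== PRECONDITION & SPEC =====
def Spec_repeatedGroups (lst : List Int) (out : List (List Int)) : Prop := out = repeatedGroups_alt lst
instance (lst : List Int) (out : List (List Int)) : Decidable (Spec_repeatedGroups lst out) := by unfold Spec_repeatedGroups; infer_instance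

-- ===== CLAIM (what is proved, stated in full; the proofs are below) =====
def Claim_equal_repeatedGroups : Prop := ∀ (lst : List Int), Dom_repeatedGroups lst → Spec_repeatedGroups lst (repeatedGroups lst)

-- ===== LEMMAS AND PROOFS =====

-- common reference point: the maximal runs of equal consecutive elements
def runs : List Int → List (List Int)
  | [] => []
  | x :: xs => (x :: xs.takeWhile (fun y => y == x)) :: runs (xs.dropWhile (fun y => y == x))
termination_by lst => lst.length
decreasing_by
  simpa [Nat.lt_succ_iff] using List.length_dropWhile_le (fun y => y == x) xs

-- ---------- A-side: A = filter (length > 1) ∘ runs ----------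

-- proof-side forward recursion: remaining groups produced by A's loop from state (prev, cur),
-- with the final flush folded in
def loopF (cur : List Int) (prev : Int) : List Int → List (List Int)
  | [] => if cur.length > 1 then [cur] else []
  | x :: xs => if x = prev then loopF (cur ++ [x]) x xs
               else (if cur.length > 1 then [cur] else []) ++ loopF [x] x xs

def finishA (st : List (List Int) × List Int) : List (List Int) :=
  if st.2.length > 1 then st.1 ++ [st.2] else st.1

-- A's fold from index k (1 ≤ k ≤ len) equals g ++ loopF over the remaining suffix
lemma keyA (lst : List Int) : ∀ (fuel k : Nat) (g : List (List Int)) (c : List Int),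
    lst.length - k = fuel → 1 ≤ k → k ≤ lst.length →
    finishA ((PySem.List.pyRange (k : Int) (lst.length : Int) 1).foldl (repeatedGroupsStep lst) (g, c)) =
      g ++ loopF c (lst.getD (k - 1) 0) (lst.drop k) := by
  intro fuel
  induction fuel with
  | zero =>
    intro k g c hfuel hk1 hk2
    have hk : k = lst.length := by omega
    subst hk
    rw [PySem.List.pyRange_one_eq_nil (by omega)]
    simp only [List.foldl_nil, finishA, List.drop_length, loopF]
    split <;> simp
  | succ n ih =>
    intro k g c hfuel hk1 hk2
    have hklt : k < lst.length := by omega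
    rw [PySem.List.pyRange_one_cons (by exact_mod_cast hklt)]
    simp only [List.foldl_cons]
    have hk0 : ¬ ((k : Int) = 0) := by omega
    have hget : PySem.List.pyGetD lst (k : Int) 0 = lst[k] :=
      PySem.List.pyGetD_ofNat lst k 0 hklt
    have hk1' : k - 1 < lst.length := by omega
    have hgetp : PySem.List.pyGetD lst ((k : Int) - 1) 0 = lst[k - 1] := by
      have hc : ((k : Int) - 1) = ((k - 1 : Nat) : Int) := by omega
      rw [hc]
      exact PySem.List.pyGetD_ofNat lst (k - 1) 0 hk1'
    have hdrop : lst.drop k = lst[k] :: lst.drop (k + 1) := List.drop_eq_getElem_cons hklt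
    have hcast : ((k : Int) + 1) = ((k + 1 : Nat) : Int) := by omega
    have hprev : lst.getD (k - 1) 0 = lst[k - 1] := List.getD_eq_getElem lst 0 hk1'
    have hp : lst.getD (k + 1 - 1) 0 = lst[k] := by
      rw [Nat.add_sub_cancel]; exact List.getD_eq_getElem lst 0 hklt
    rw [hdrop]
    by_cases hne : lst[k] = lst[k - 1]
    · -- equal to previous: extend current group
      have hstep : repeatedGroupsStep lst (g, c) (k : Int) = (g, c ++ [lst[k]]) := by
        simp only [repeatedGroupsStep, hget, hgetp]
        rw [if_neg (by push Not; exact ⟨hk0, hne⟩)]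
      rw [hstep, hcast, ih (k + 1) g (c ++ [lst[k]]) (by omega) (by omega) (by omega), hp, hprev]
      simp only [loopF]
      rw [if_pos hne]
    · -- new group starts
      have hstep : repeatedGroupsStep lst (g, c) (k : Int) =
          (if c.length > 1 then g ++ [c] else g, [lst[k]]) := by
        simp only [repeatedGroupsStep, hget, hgetp]
        rw [if_pos (Or.inr hne)]
      rw [hstep, hcast, ih (k + 1) _ [lst[k]] (by omega) (by omega) (by omega), hp, hprev]
      simp only [loopF]
      rw [if_neg hne]
      by_cases hc : c.length > 1 <;> simp [hc]

-- A equals loopF started after the first element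
lemma A_eq_loopF (x : Int) (xs : List Int) :
    repeatedGroups (x :: xs) = loopF [x] x xs := by
  unfold repeatedGroups
  show finishA ((PySem.List.pyRange 0 ((x :: xs).length : Int) 1).foldl (repeatedGroupsStep (x :: xs)) ([], [])) = _
  rw [PySem.List.pyRange_one_cons (by simp)]
  simp only [List.foldl_cons]
  have h0 : repeatedGroupsStep (x :: xs) ([], []) 0 = ([], [x]) := by
    simp [repeatedGroupsStep, PySem.List.pyGetD_zero_cons]
  rw [h0]
  have := keyA (x :: xs) xs.length 1 [] [x] (by simp) (by omega) (by simp)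
  simp only [List.length_cons, Nat.cast_add, Nat.cast_one, zero_add] at this ⊢
  rw [this]
  simp

-- loopF is runs-then-filter
lemma loopF_eq_filter (rest : List Int) : ∀ (cur : List Int) (prev : Int),
    loopF cur prev rest =
      ((cur ++ rest.takeWhile (fun y => y == prev)) :: runs (rest.dropWhile (fun y => y == prev))).filter
        (fun r => r.length > 1) := by
  induction rest with
  | nil =>
    intro cur prev
    by_cases h : cur.length > 1 <;> simp [loopF, runs, List.filter, h]
  | cons x xs ih =>
    intro cur prev
    by_cases h : x = prev
    · subst h
      have hL : loopF cur x (x :: xs) = loopF (cur ++ [x]) x xs := by simp [loopF]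
      have hT : (x :: xs).takeWhile (fun y => y == x) = x :: xs.takeWhile (fun y => y == x) := by
        simp [List.takeWhile_cons]
      have hD : (x :: xs).dropWhile (fun y => y == x) = xs.dropWhile (fun y => y == x) := by
        simp [List.dropWhile_cons]
      rw [hL, hT, hD, ih (cur ++ [x]) x]
      simp
    · have hb : (x == prev) = false := by simp [h]
      have hL : loopF cur prev (x :: xs) =
          (if cur.length > 1 then [cur] else []) ++ loopF [x] x xs := by simp [loopF, h]
      have hT : (x :: xs).takeWhile (fun y => y == prev) = [] := by
        simp [List.takeWhile_cons, hb]
      have hD : (x :: xs).dropWhile (fun y => y == prev) = x :: xs := by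
        simp [List.dropWhile_cons, hb]
      rw [hL, hT, hD, ih [x] x]
      rw [show runs (x :: xs) = (x :: xs.takeWhile (fun y => y == x)) :: runs (xs.dropWhile (fun y => y == x)) from by rw [runs]]
      by_cases hc : cur.length > 1 <;> simp [hc, List.filter]

lemma A_eq_runs (lst : List Int) :
    repeatedGroups lst = (runs lst).filter (fun r => r.length > 1) := by
  cases lst with
  | nil =>
    rw [show runs ([] : List Int) = [] from by rw [runs]]
    rfl
  | cons x xs =>
    rw [A_eq_loopF, loopF_eq_filter]
    rw [show runs (x :: xs) = (x :: xs.takeWhile (fun y => y == x)) :: runs (xs.dropWhile (fun y => y == x)) from by rw [runs]]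
    rfl

-- ---------- B-side: B = filter (length > 1) ∘ runs ----------

-- Nat-level boundary predicate / boundary list / slice-assembly of B
def predN (lst : List Int) (i : Nat) : Bool :=
  (i == 0) || !(lst.getD i 0 == lst.getD (i - 1) 0)

def boundsN (lst : List Int) : List Nat :=
  (List.range lst.length).filter (predN lst) ++ [lst.length]

def procN (lst : List Int) (bs : List Nat) : List (List Int) :=
  ((bs.zip bs.tail).filter (fun ab => decide (ab.1 + 1 < ab.2))).map
    (fun ab => (lst.drop ab.1).take (ab.2 - ab.1))

-- B's Int-level pipeline is the Nat-level one
lemma B_reduce (lst : List Int) : repeatedGroups_alt lst = procN lst (boundsN lst) := by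
  unfold repeatedGroups_alt procN boundsN
  simp only [PySem.List.len_eq, PySem.List.pyRange_zero_natCast, List.filter_map]
  have hpred : ∀ i ∈ List.range lst.length,
      ((fun i => decide (i = 0) || !(PySem.List.pyGetD lst i 0 == PySem.List.pyGetD lst (i - 1) 0)) ∘
        (Nat.cast : Nat → Int)) i = predN lst i := by
    intro i _
    simp only [Function.comp, predN, PySem.List.pyGetD_natCast]
    rcases Nat.eq_zero_or_pos i with h0 | hpos
    · subst h0; simp
    · have h1 : ((i : Int) - 1) = ((i - 1 : Nat) : Int) := by omega
      have h2 : (decide ((i : Int) = 0)) = (i == 0) := by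
        simp [Nat.pos_iff_ne_zero.mp hpos]
      rw [h1, h2, PySem.List.pyGetD_natCast]
  rw [List.filter_congr hpred]
  have hmapapp : ((List.range lst.length).filter (predN lst)).map (Nat.cast : Nat → Int)
      ++ [(lst.length : Int)]
      = (((List.range lst.length).filter (predN lst)) ++ [lst.length]).map (Nat.cast : Nat → Int) := by
    simp
  rw [hmapapp]
  set bs := ((List.range lst.length).filter (predN lst)) ++ [lst.length] with hbs
  rw [PySem.List.slice_from_one, ← List.map_tail, List.zip_map, List.filter_map, List.map_map]
  have hfil : ∀ ab ∈ bs.zip bs.tail,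
      ((fun ab => decide (ab.2 - ab.1 > 1)) ∘ Prod.map (Nat.cast : Nat → Int) (Nat.cast : Nat → Int)) ab
        = (fun ab => decide (ab.1 + 1 < ab.2)) ab := by
    rintro ⟨a, b⟩ _
    simp only [Function.comp, Prod.map]
    exact decide_eq_decide.mpr (by omega)
  rw [List.filter_congr hfil]
  apply List.map_congr_left
  rintro ⟨a, b⟩ _
  simp only [Function.comp, Prod.map]
  exact PySem.List.slice_natCast lst a b

-- every element of the first run equals its head
lemma run_all_eq (x : Int) (xs : List Int) :
    ∀ i, i < (x :: xs.takeWhile (fun y => y == x)).length →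
      (x :: xs.takeWhile (fun y => y == x)).getD i 0 = x := by
  intro i hi
  match i with
  | 0 => rfl
  | j + 1 =>
    have hj : j < (xs.takeWhile (fun y => y == x)).length := by simpa using hi
    have hmem : (xs.takeWhile (fun y => y == x))[j] ∈ xs.takeWhile (fun y => y == x) :=
      List.getElem_mem hj
    have hx : (xs.takeWhile (fun y => y == x))[j] = x := by
      simpa using List.mem_takeWhile_imp hmem
    simp [List.getD_cons_succ, List.getD_eq_getElem _ _ hj, hx, List.getElem?_eq_getElem hj]

-- the head of the dropped suffix differs from the run value
lemma drop_head_ne (x : Int) (xs : List Int) (h : xs.dropWhile (fun y => y == x) ≠ []) :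
    ((xs.dropWhile (fun y => y == x)).getD 0 0 == x) = false := by
  have hh := List.head_dropWhile_not (fun y => y == x) h
  have : (xs.dropWhile (fun y => y == x)).getD 0 0 = (xs.dropWhile (fun y => y == x)).head h := by
    rw [List.getD_eq_getElem _ _ (by simpa [List.length_pos_iff] using h), List.getElem_zero]
  rw [this]
  simpa using hh

-- boundary indices of r ++ d, where r is the first maximal run
lemma boundary_split (x : Int) (xs : List Int) :
    (List.range (x :: xs).length).filter (predN (x :: xs)) =
      0 :: ((List.range (xs.dropWhile (fun y => y == x)).length).filter
              (predN (xs.dropWhile (fun y => y == x)))).map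
            ((x :: xs.takeWhile (fun y => y == x)).length + ·) := by
  set r := x :: xs.takeWhile (fun y => y == x) with hr
  set d := xs.dropWhile (fun y => y == x) with hd
  set k := r.length with hk
  have hrl : (x :: List.takeWhile (fun y => y == x) xs).length = k := rfl
  have hsplit : (x :: xs) = r ++ d := by
    simp [hr, hd, List.takeWhile_append_dropWhile]
  have hlen : (x :: xs).length = k + d.length := by rw [hsplit]; simp [hk]
  have hkpos : 1 ≤ k := by rw [hk, hr]; simp
  rw [hlen, List.range_add, List.filter_append, List.filter_map]
  -- first part: only index 0 survives
  have h1 : (List.range k).filter (predN (x :: xs)) = [0] := by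
    have hcongr : ∀ i ∈ List.range k, predN (x :: xs) i = (i == 0) := by
      intro i hi
      rw [List.mem_range] at hi
      rcases Nat.eq_zero_or_pos i with h0 | hpos
      · subst h0; rfl
      · have e1 : (x :: xs).getD i 0 = x := by
          rw [hsplit, List.getD_append _ _ _ _ (by omega)]
          exact run_all_eq x xs i (by omega)
        have e2 : (x :: xs).getD (i - 1) 0 = x := by
          rw [hsplit, List.getD_append _ _ _ _ (by omega)]
          exact run_all_eq x xs (i - 1) (by omega)
        unfold predN
        rw [e1, e2]
        simp [Nat.pos_iff_ne_zero.mp hpos]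
    rw [List.filter_congr hcongr]
    obtain ⟨m, hm⟩ := Nat.exists_eq_add_of_le hkpos
    rw [hm, List.range_add, List.filter_append, List.filter_map]
    have ha : (List.range 1).filter (fun i => i == 0) = [0] := by decide
    have hb2 : (List.range m).filter ((fun i => i == 0) ∘ fun y => 1 + y) = [] := by
      apply List.filter_eq_nil_iff.mpr
      intro a _
      simp [Function.comp]
    rw [ha, hb2]
    simp
  rw [h1]
  -- second part: shifted boundaries of d
  have h2 : ∀ j ∈ List.range d.length, (predN (x :: xs) ∘ fun y => k + y) j = predN d j := by
    intro j hj
    rw [List.mem_range] at hj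
    have e1 : (x :: xs).getD (k + j) 0 = d.getD j 0 := by
      rw [hsplit, List.getD_append_right _ _ _ _ (by omega)]
      congr 1
      omega
    simp only [Function.comp]
    rcases Nat.eq_zero_or_pos j with h0 | hpos
    · subst h0
      have e2 : (x :: xs).getD (k + 0 - 1) 0 = x := by
        rw [hsplit, List.getD_append _ _ _ _ (by omega)]
        exact run_all_eq x xs (k + 0 - 1) (by omega)
      have hdne : d ≠ [] := by
        intro hnil
        rw [hnil] at hj
        simp at hj
      have hne : (d.getD 0 0 == x) = false := by
        rw [hd] at hdne ⊢
        exact drop_head_ne x xs hdne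
      unfold predN
      rw [e1, e2]
      have hA : (k + 0 == 0) = false := by
        simp only [beq_eq_false_iff_ne]
        omega
      rw [hA]
      simp
      exact (by simpa [List.getD] using hne)
    · have e2 : (x :: xs).getD (k + j - 1) 0 = d.getD (j - 1) 0 := by
        rw [hsplit, List.getD_append_right _ _ _ _ (by omega)]
        congr 1
        omega
      unfold predN
      rw [e1, e2]
      have hA : (k + j == 0) = false := by
        simp only [beq_eq_false_iff_ne]
        omega
      have hB : (j == 0) = false := by
        simp only [beq_eq_false_iff_ne]
        omega
      rw [hA, hB]
  rw [List.filter_congr h2]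
  simp

-- shifting every boundary by the length of a prefix shifts the slices into the suffix
lemma proc_shift (r d : List Int) (l : List Nat) :
    procN (r ++ d) (l.map (r.length + ·)) = procN d l := by
  unfold procN
  rw [← List.map_tail, List.zip_map, List.filter_map, List.map_map]
  have hfil : ∀ ab ∈ l.zip l.tail,
      ((fun ab => decide (ab.1 + 1 < ab.2)) ∘ Prod.map (r.length + ·) (r.length + ·)) ab
        = (fun ab => decide (ab.1 + 1 < ab.2)) ab := by
    rintro ⟨a, b⟩ _
    simp only [Function.comp, Prod.map]
    exact decide_eq_decide.mpr (by omega)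
  rw [List.filter_congr hfil]
  apply List.map_congr_left
  rintro ⟨a, b⟩ _
  simp only [Function.comp, Prod.map]
  rw [List.drop_append, List.drop_eq_nil_of_le (by omega), List.nil_append,
    show r.length + a - r.length = a by omega,
    show r.length + b - (r.length + a) = b - a by omega]

-- the boundary list always starts with 0 (nonempty list)
lemma boundsN_head (d : List Int) : ∃ cs, boundsN d = 0 :: cs := by
  cases d with
  | nil => exact ⟨[], rfl⟩
  | cons y ys =>
    unfold boundsN
    have : List.range (y :: ys).length = 0 :: (List.range ys.length).map (· + 1) := by
      simp [List.range_succ_eq_map, Function.comp_def, Nat.add_comm]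
    rw [this]
    simp only [List.filter_cons]
    rw [show predN (y :: ys) 0 = true from rfl]
    exact ⟨_, rfl⟩

-- main induction: B's Nat-level pipeline computes filter (length > 1) ∘ runs
lemma procN_eq_runs (lst : List Int) :
    procN lst (boundsN lst) = (runs lst).filter (fun r => r.length > 1) := by
  induction lst using runs.induct with
  | case1 =>
    rw [show runs ([] : List Int) = [] from by rw [runs]]
    rfl
  | case2 x xs ih =>
    set r := x :: xs.takeWhile (fun y => y == x) with hr
    set d := xs.dropWhile (fun y => y == x) with hd
    set k := r.length with hk
    have hsplit : (x :: xs) = r ++ d := by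
      simp [hr, hd, List.takeWhile_append_dropWhile]
    have hlen : (x :: xs).length = k + d.length := by
      rw [hsplit]; simp [hk]
    have hb : boundsN (x :: xs) = 0 :: (boundsN d).map (k + ·) := by
      unfold boundsN
      rw [boundary_split x xs, hlen]
      simp [← hr, ← hd, ← hk]
    obtain ⟨cs, hcs⟩ := boundsN_head d
    have hruns : runs (x :: xs) = r :: runs d := by rw [runs]
    rw [hb, hcs]
    -- peel the first pair (0, k) off the pipeline
    have hzip : ((0 :: (0 :: cs).map (k + ·)).zip ((0 :: cs).map (k + ·)))
        = (0, k) :: (((0 :: cs).map (k + ·)).zip (cs.map (k + ·))) := by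
      simp [List.zip]
    have hstep : procN (x :: xs) (0 :: (0 :: cs).map (k + ·))
        = (if 0 + 1 < k then [((x :: xs).drop 0).take k] else [])
          ++ procN (x :: xs) ((0 :: cs).map (k + ·)) := by
      unfold procN
      rw [show (0 :: (0 :: cs).map (k + ·)).tail = (0 :: cs).map (k + ·) from rfl, hzip,
        List.filter_cons]
      by_cases hc : 0 + 1 < k
      · simp only [hc, decide_true, if_pos trivial, List.map_cons]
        rw [show k - 0 = k from rfl]
        simp
      · simp only [hc, decide_false]
        simp [hc]
    have hps := proc_shift r d (boundsN d)
    rw [← hsplit, ← hk] at hps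
    rw [hstep, ← hcs, hps, ih, hruns, List.filter_cons]
    have htake : ((x :: xs).drop 0).take k = r := by
      rw [List.drop_zero, hsplit, hk, List.take_left]
    rw [htake]
    by_cases hc : 1 < k
    · simp only [show (0 + 1 < k) = (1 < k) from by rw [Nat.zero_add], hc, if_pos trivial]
      have : decide (r.length > 1) = true := by simp [← hk, hc]
      simp [this]
    · simp only [show (0 + 1 < k) = (1 < k) from by rw [Nat.zero_add], hc, if_neg]
      have : decide (r.length > 1) = false := by simp [← hk]; omega
      simp [this, hc]

-- ===== VERDICT (by name: the statement is the Claim_ definition above) =====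
theorem repeatedGroups_spec : Claim_equal_repeatedGroups := by
  intro lst _
  show repeatedGroups lst = repeatedGroups_alt lst
  rw [A_eq_runs, B_reduce, procN_eq_runs]
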